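-- pv_equiv track=rewrite | github.com/JSJSWON/algorithm | programmers/level_3/퍼즐조각채우기.py | solution
-- ===== SOURCE A (Python) =====
-- from copy import deepcopy
--
-- def solution(game_board, table):
--     # table에서 각 모양의 좌표 구하기
--     def get_crd_in_table(table, empty):  # empty == 0: 채워진 블록 찾기, empty == 1: 빈 블록 찾기
--         path = []
--         total_path = []
--
--         def dfs(i, j):
--             if i < 0 or j < 0 or i >= len(table) or j >= len(table[0]) or table[i][j] == empty or table[i][j] == -1:
--                 return
--             table[i][j] = -1
--             path.append([i, j])
--             dfs(i - 1, j)
--             dfs(i, j - 1)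
--             dfs(i + 1, j)
--             dfs(i, j + 1)
--
--         for i in range(len(table)):
--             for j in range(len(table[0])):
--                 if table[i][j] != empty:
--                     dfs(i, j)
--                     total_path.append(path)
--                     path = []
--
--         return total_path
--
--     # game_board에서 구해주기
--     g_paths = get_crd_in_table(game_board, 1)
--
--     # paths와 g_paths에서 겹치는 모양 찾기
--
--     def cnt():
--         ans = 0
--         visited = []
--         while True:
--             tmp = 0
--             for g in deepcopy(g_paths):
--                 if g in visited:
--                     continue
--                 for t in deepcopy(paths):
--                     if len(g) == len(t):
--                         if len(set([(g[i][0] - t[i][0], g[i][1] - t[i][1]) for i in range(len(g))])) == 1: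
--                             ans += len(g)
--                             g_paths.remove(g)
--                             for ii, jj in t:
--                                 table[ii][jj] = 0
--                             paths.remove(t)
--                             tmp = 1
--                             break
--                 if tmp == 0:
--                     visited.append(g)
--                 if tmp == 1:
--                     break
--             if tmp == 0:
--                 break
--         return ans
--
--     answer = 0
--     paths = get_crd_in_table(deepcopy(table), 0)
--     answer += cnt()
--     table = list(map(list, zip(*reversed(table))))
--     paths = get_crd_in_table(deepcopy(table), 0)
--     answer += cnt()
--     table = list(map(list, zip(*reversed(table))))
--     paths = get_crd_in_table(deepcopy(table), 0)
--     answer += cnt()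
--     table = list(map(list, zip(*reversed(table))))
--     paths = get_crd_in_table(deepcopy(table), 0)
--     answer += cnt()
--
--     return answer
-- ===== SOURCE B (Python) =====
-- def solution(game_board, table):
--     # B: same flood-fill component extraction, but matching done in one pass per
--     # rotation via a hash index from normalized shape to piece indices (instead of A's
--     # restarting while/visited/remove scan). B does not mutate its arguments.
--
--     def extract(grid, empty):  # flood-fill components of cells != empty; mutates grid (callers pass copies)
--         comps = []
--
--         def dfs(i, j, path):
--             if i < 0 or j < 0 or i >= len(grid) or j >= len(grid[0]) or grid[i][j] == empty or grid[i][j] == -1: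
--                 return
--             grid[i][j] = -1
--             path.append((i, j))
--             dfs(i - 1, j, path)
--             dfs(i, j - 1, path)
--             dfs(i + 1, j, path)
--             dfs(i, j + 1, path)
--
--         for i in range(len(grid)):
--             for j in range(len(grid[0])):
--                 if grid[i][j] != empty:
--                     path = []
--                     dfs(i, j, path)
--                     comps.append(path)
--         return comps
--
--     def norm(p):
--         i0, j0 = p[0]
--         return tuple((i - i0, j - j0) for i, j in p)
--
--     holes = extract([list(r) for r in game_board], 1)
--     tbl = [list(r) for r in table]
--     ans = 0
--     for _ in range(4):
--         pieces = extract([list(r) for r in tbl], 0)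
--         index = {}
--         for k, p in enumerate(pieces):
--             if p:
--                 index.setdefault(norm(p), []).append(k)
--         rest = []
--         for g in holes:
--             ids = index.get(norm(g)) if g else None
--             if ids:
--                 k = ids.pop(0)
--                 ans += len(g)
--                 for i, j in pieces[k]:
--                     tbl[i][j] = 0
--             else:
--                 rest.append(g)
--         holes = rest
--         tbl = [list(r) for r in zip(*reversed(tbl))]
--     return ans
-- ===== Notes on version B (the rewrite author's own statement) =====
-- stated objective: alternative
-- what changed: B keeps the same flood-fill component extraction and board rotations but replaces A's restarting while/visited/list.remove matching scan (pairwise shape comparison with deepcopies of both lists on every restart) by a hash index from translation-normalized shape to piece indices, matching all holes in one pass per rotation.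
import Mathlib
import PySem

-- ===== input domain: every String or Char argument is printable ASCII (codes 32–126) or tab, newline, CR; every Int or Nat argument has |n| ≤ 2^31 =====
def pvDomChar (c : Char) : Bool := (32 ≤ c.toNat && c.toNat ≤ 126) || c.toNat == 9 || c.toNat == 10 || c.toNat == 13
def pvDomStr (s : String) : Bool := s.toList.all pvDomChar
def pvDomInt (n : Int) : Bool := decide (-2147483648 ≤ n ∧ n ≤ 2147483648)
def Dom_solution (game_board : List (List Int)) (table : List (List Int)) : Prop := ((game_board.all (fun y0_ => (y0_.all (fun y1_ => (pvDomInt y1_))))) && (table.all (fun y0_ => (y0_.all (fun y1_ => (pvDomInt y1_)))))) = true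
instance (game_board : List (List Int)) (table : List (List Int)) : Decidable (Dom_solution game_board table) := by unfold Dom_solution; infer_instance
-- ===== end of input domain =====

-- B replaces A's repeated while/visited/remove matching scan (with its deepcopies and
-- inner pairwise shape comparison) by a hash index from translation-normalized shape to
-- piece indices, one pass per rotation (objective: alternative).
-- Equivalence is about the RETURN value only: A mutates game_board (and, for matched
-- pieces of the first rotation, table) in place; B does not mutate its arguments.
-- Both programs share the identical flood-fill component extraction and board rotation;
-- they are ported once as the shared helpers pvDfs/pvExtract/pvRot below.

-- ===== PORT A =====
-- shared helpers (identical code in Source A's get_crd_in_table / rotation and Source B's extract / rotation)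

-- grid cell read table[i][j]; callers only use it with 0 ≤ i < len, 0 ≤ j ≤ row length
def pvGetCell (g : List (List Int)) (i j : Int) : Int :=
  PySem.List.pyGetD (PySem.List.pyGetD g i []) j 0

-- table[i][j] = v
def pvSetCell (g : List (List Int)) (i j : Int) (v : Int) : List (List Int) :=
  PySem.List.pySetD g i (PySem.List.pySetD (PySem.List.pyGetD g i []) j v)

-- the recursive dfs of get_crd_in_table / extract; fuel only makes the recursion
-- structural (callers pass rows*cols+2, more than the maximal recursion depth:
-- every non-returning level marks one previously unmarked cell with -1)
def pvDfs : Nat → Int → List (List Int) → Int → Int → List (Int × Int) →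
    List (List Int) × List (Int × Int)
  | 0, _, g, _, _, path => (g, path)
  | fuel+1, empty, g, i, j, path =>
    if i < 0 ∨ j < 0 ∨ (g.length : Int) ≤ i ∨ (((g.headD []).length : Int)) ≤ j ∨
        pvGetCell g i j = empty ∨ pvGetCell g i j = -1 then (g, path)
    else
      let g1 := pvSetCell g i j (-1)
      let p1 := path ++ [(i, j)]
      let r1 := pvDfs fuel empty g1 (i-1) j p1
      let r2 := pvDfs fuel empty r1.1 i (j-1) r1.2
      let r3 := pvDfs fuel empty r2.1 (i+1) j r2.2
      pvDfs fuel empty r3.1 i (j+1) r3.2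

-- get_crd_in_table / extract: scan row-major, flood-fill each component
-- (row lengths are invariant under pvDfs, so the loop bounds are computed once)
def pvExtract (g : List (List Int)) (empty : Int) :
    List (List Int) × List (List (Int × Int)) :=
  let h := g.length
  let w := (g.headD []).length
  (List.range h).foldl (fun st i =>
    (List.range w).foldl (fun st j =>
      if pvGetCell st.1 (i : Int) (j : Int) ≠ empty then
        let r := pvDfs (h * w + 2) empty st.1 (i : Int) (j : Int) []
        (r.1, st.2 ++ [r.2])
      else st) st) (g, [])

-- zip(*rows): truncates at the shortest row, zip() of no rows is []
def pvZipCols (rows : List (List Int)) : List (List Int) :=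
  match rows with
  | [] => []
  | r :: rs =>
    if r.isEmpty ∨ rs.any (fun l => l.isEmpty) then []
    else (r.headD 0 :: rs.map (fun l => l.headD 0)) :: pvZipCols (r.tail :: rs.map (fun l => l.tail))
termination_by (rows.headD []).length
decreasing_by
  simp only [List.headD_cons, List.length_tail]
  have : r ≠ [] := by
    intro hr; subst hr; simp at *
  have : 0 < r.length := List.length_pos_iff.mpr this
  omega

-- list(map(list, zip(*reversed(table))))
def pvRot (g : List (List Int)) : List (List Int) := pvZipCols g.reverse

-- for ii, jj in t: table[ii][jj] = 0
def pvZero (t : List (Int × Int)) (g : List (List Int)) : List (List Int) :=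
  t.foldl (fun gr c => pvSetCell gr c.1 c.2 0) g

-- A-only helpers (the cnt machinery)

-- [(g[i][0] - t[i][0], g[i][1] - t[i][1]) for i in range(len(g))]
def pvOffsets (g t : List (Int × Int)) : List (Int × Int) :=
  (List.range g.length).map (fun i =>
    ((g.getD i (0,0)).1 - (t.getD i (0,0)).1, (g.getD i (0,0)).2 - (t.getD i (0,0)).2))

-- the nested condition 'len(g) == len(t)' and 'len(set(...)) == 1'
def pvMatchA (g t : List (Int × Int)) : Bool :=
  g.length == t.length && (PySem.Set.ofList (pvOffsets g t)).length == 1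

-- the inner 'for t in deepcopy(paths)' scan, up to the first match
def pvFindT : List (List (Int × Int)) → List (Int × Int) → Option (List (Int × Int))
  | [], _ => none
  | t :: rest, g => if pvMatchA g t then some t else pvFindT rest g

-- one 'for g in deepcopy(g_paths)' sweep: skip visited, append non-matchers to visited,
-- stop at the first (g, t) match
def pvScanG : List (List (Int × Int)) → List (List (Int × Int)) → List (List (Int × Int)) →
    List (List (Int × Int)) × Option (List (Int × Int) × List (Int × Int))
  | [], visited, _ => (visited, none)
  | g :: rest, visited, paths =>
    if visited.contains g then pvScanG rest visited paths
    else match pvFindT paths g with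
      | some t => (visited, some (g, t))
      | none => pvScanG rest (visited ++ [g]) paths

-- the 'while True' of cnt; each pass removes a matched pair or terminates, so
-- fuel = len(g_paths) + 1 (passed by the caller) is never exhausted
def pvCnt : Nat → List (List (Int × Int)) → List (List (Int × Int)) → List (List Int) →
    Int → List (List (Int × Int)) → Int × List (List (Int × Int)) × List (List Int)
  | 0, gs, _, tbl, ans, _ => (ans, gs, tbl)
  | fuel+1, gs, paths, tbl, ans, visited =>
    match pvScanG gs visited paths with
    | (_, none) => (ans, gs, tbl)
    | (v', some (g, t)) =>
      pvCnt fuel (gs.erase g) (paths.erase t) (pvZero t tbl) (ans + (g.length : Int)) v'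

def solution (game_board : List (List Int)) (table : List (List Int)) : Int :=
  let gps := (pvExtract game_board 1).2
  let answer : Int := 0
  let paths := (pvExtract table 0).2
  let r1 := pvCnt (gps.length + 1) gps paths table 0 []
  let answer := answer + r1.1
  let table := pvRot r1.2.2
  let paths := (pvExtract table 0).2
  let r2 := pvCnt (r1.2.1.length + 1) r1.2.1 paths table 0 []
  let answer := answer + r2.1
  let table := pvRot r2.2.2
  let paths := (pvExtract table 0).2
  let r3 := pvCnt (r2.2.1.length + 1) r2.2.1 paths table 0 []
  let answer := answer + r3.1
  let table := pvRot r3.2.2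
  let paths := (pvExtract table 0).2
  let r4 := pvCnt (r3.2.1.length + 1) r3.2.1 paths table 0 []
  answer + r4.1

-- ===== PORT B =====

-- norm(p): shape translated so that its first cell is (0, 0)
def pvNorm (p : List (Int × Int)) : List (Int × Int) :=
  match p with
  | [] => []
  | c :: _ => p.map (fun x => (x.1 - c.1, x.2 - c.2))

-- index.setdefault(norm(p), []).append(k) over enumerate(pieces), skipping empty shapes
def pvBuildIndex (pieces : List (List (Int × Int))) : PySem.Dict (List (Int × Int)) (List Int) :=
  (PySem.List.enumerate pieces).foldl
    (fun d kp => if kp.2.isEmpty then d else d.modify (pvNorm kp.2) [] (· ++ [kp.1]))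
    PySem.Dict.empty

-- the single 'for g in holes' pass: pop the first indexed piece of the hole's shape
def pvBPass : List (List (Int × Int)) → List (List (Int × Int)) →
    PySem.Dict (List (Int × Int)) (List Int) → List (List Int) → Int →
    List (List (Int × Int)) → Int × List (List (Int × Int)) × List (List Int)
  | [], _, _, tbl, ans, rest => (ans, rest, tbl)
  | g :: hs, pieces, d, tbl, ans, rest =>
    if g.isEmpty then pvBPass hs pieces d tbl ans (rest ++ [g])
    else
      match d.getD (pvNorm g) [] with
      | k :: ks =>
        let t := PySem.List.pyGetD pieces k []
        pvBPass hs pieces (d.insert (pvNorm g) ks) (pvZero t tbl) (ans + (g.length : Int)) rest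
      | [] => pvBPass hs pieces d tbl ans (rest ++ [g])

-- the body of Source B's 'for _ in range(4)' loop on the state (holes, tbl, ans)
def pvBStep (st : List (List (Int × Int)) × List (List Int) × Int) :
    List (List (Int × Int)) × List (List Int) × Int :=
  let pieces := (pvExtract st.2.1 0).2
  let d := pvBuildIndex pieces
  let r := pvBPass st.1 pieces d st.2.1 st.2.2 []
  (r.2.1, pvRot r.2.2, r.1)

def solution_alt (game_board : List (List Int)) (table : List (List Int)) : Int :=
  let holes := (pvExtract game_board 1).2
  let st := (PySem.List.pyRange 0 4 1).foldl (fun st _ => pvBStep st) (holes, table, 0)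
  st.2.2

-- ===== PRECONDITION & SPEC =====
-- Pre_ excludes exactly the inputs on which A raises IndexError: a board row shorter
-- than the first row of its board (the scan loops index every row up to len(row 0)).
def Pre_solution (game_board : List (List Int)) (table : List (List Int)) : Prop :=
  (∀ r ∈ game_board, (game_board.headD []).length ≤ r.length) ∧
  (∀ r ∈ table, (table.headD []).length ≤ r.length)
instance (game_board : List (List Int)) (table : List (List Int)) : Decidable (Pre_solution game_board table) := by unfold Pre_solution; infer_instance

def pvWitness_solution : List (List Int) × List (List Int) := ([[1, 0], [1, 1]], [[0, 1], [0, 0]])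

def Spec_solution (game_board : List (List Int)) (table : List (List Int)) (out : Int) : Prop := out = solution_alt game_board table
instance (game_board : List (List Int)) (table : List (List Int)) (out : Int) : Decidable (Spec_solution game_board table out) := by unfold Spec_solution; infer_instance

-- ===== CLAIM (what is proved, stated in full; the proofs are below) =====
def Claim_equal_solution : Prop := ∀ (game_board : List (List Int)) (table : List (List Int)), Dom_solution game_board table → Pre_solution game_board table → Spec_solution game_board table (solution game_board table)


-- the single left-to-right matching pass both programs amount to: each hole in order
-- consumes the first remaining piece its shape matches (A via its restarting while loop,
-- B via the shape index); proof-side reference function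
def pvPass1 : List (List (Int × Int)) → List (List (Int × Int)) → List (List Int) → Int →
    Int × List (List (Int × Int)) × List (List Int)
  | [], _, tbl, ans => (ans, [], tbl)
  | g :: rest, paths, tbl, ans =>
    match pvFindT paths g with
    | some t => pvPass1 rest (paths.erase t) (pvZero t tbl) (ans + (g.length : Int))
    | none =>
      let r := pvPass1 rest paths tbl ans
      (r.1, g :: r.2.1, r.2.2)

theorem pvFindT_eq_find? (paths : List (List (Int × Int))) (g : List (Int × Int)) :
    pvFindT paths g = paths.find? (fun t => pvMatchA g t) := by
  induction paths with
  | nil => rfl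
  | cons t rest ih => simp only [pvFindT, List.find?]; split <;> simp_all

theorem pv_set_len_one_iff {α : Type} [BEq α] [LawfulBEq α] (l : List α) :
    ((PySem.Set.ofList l).length = 1) ↔ ∃ x, l ≠ [] ∧ ∀ y ∈ l, y = x := by
  cases l with
  | nil => simp [PySem.Set.ofList_nil]
  | cons x xs =>
    rw [PySem.Set.ofList_cons]
    simp only [List.length_cons]
    constructor
    · intro h
      have hd : PySem.Set.discard (PySem.Set.ofList xs) x = [] :=
        List.eq_nil_of_length_eq_zero (by omega)
      refine ⟨x, by simp, ?_⟩
      intro y hy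
      rcases List.mem_cons.mp hy with rfl | hmem
      · rfl
      · by_contra hne
        have hyd : y ∈ PySem.Set.discard (PySem.Set.ofList xs) x :=
          (PySem.Set.mem_discard _ _ _).mpr ⟨(PySem.Set.mem_ofList _ _).mpr hmem, hne⟩
        rw [hd] at hyd
        simp at hyd
    · rintro ⟨x0, -, hall⟩
      have hx : x = x0 := hall x (by simp)
      have hd : PySem.Set.discard (PySem.Set.ofList xs) x = [] := by
        rw [List.eq_nil_iff_forall_not_mem]
        intro y hy
        have h2 := (PySem.Set.mem_discard _ _ _).mp hy
        have hyx : y = x := by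
          rw [hall y (List.mem_cons_of_mem x ((PySem.Set.mem_ofList _ _).mp h2.1)), hx]
        exact h2.2 hyx
      simp [hd]

theorem pvNorm_length (p : List (Int × Int)) : (pvNorm p).length = p.length := by
  cases p <;> simp [pvNorm]

theorem pvNorm_getElem (p : List (Int × Int)) (i : Nat) (h : i < p.length) :
    (pvNorm p)[i]'(by rw [pvNorm_length]; exact h) =
      ((p[i]'h).1 - (p[0]'(by omega)).1, (p[i]'h).2 - (p[0]'(by omega)).2) := by
  cases p with
  | nil => simp at h
  | cons c rest => simp only [pvNorm, List.getElem_map, List.getElem_cons_zero]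

theorem pvMatchA_eq (g t : List (Int × Int)) :
    pvMatchA g t = (!g.isEmpty && !t.isEmpty && (pvNorm g == pvNorm t)) := by
  rw [Bool.eq_iff_iff]
  constructor
  · intro hA
    rw [pvMatchA, Bool.and_eq_true] at hA
    obtain ⟨hlenb, hsetb⟩ := hA
    have hlen : g.length = t.length := by simpa using hlenb
    have hset : (PySem.Set.ofList (pvOffsets g t)).length = 1 := by simpa using hsetb
    obtain ⟨x, hne, hall⟩ := (pv_set_len_one_iff _).mp hset
    simp only [pvOffsets] at hne hall
    have hglen : g.length ≠ 0 := by
      intro h0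
      exact hne (by simp [h0])
    have hg : g ≠ [] := by
      intro h0; exact hglen (by simp [h0])
    have ht : t ≠ [] := by
      intro h0
      rw [h0] at hlen; simp at hlen; exact hg hlen
    have hgpos : 0 < g.length := Nat.pos_of_ne_zero hglen
    have hilt : ∀ i, i < g.length → i < t.length := fun i hi => by omega
    have hnorm : pvNorm g = pvNorm t := by
      apply List.ext_getElem (by rw [pvNorm_length, pvNorm_length]; exact hlen)
      intro i h1 h2
      rw [pvNorm_length] at h1
      rw [pvNorm_getElem g i h1, pvNorm_getElem t i (hilt i h1)]
      have hmem : ∀ j, j < g.length →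
          ((g.getD j (0,0)).1 - (t.getD j (0,0)).1, (g.getD j (0,0)).2 - (t.getD j (0,0)).2) = x := by
        intro j hj
        exact hall _ (List.mem_map.mpr ⟨j, List.mem_range.mpr hj, rfl⟩)
      have heq : ((g.getD i (0,0)).1 - (t.getD i (0,0)).1, (g.getD i (0,0)).2 - (t.getD i (0,0)).2)
          = ((g.getD 0 (0,0)).1 - (t.getD 0 (0,0)).1, (g.getD 0 (0,0)).2 - (t.getD 0 (0,0)).2) := by
        rw [hmem i h1, hmem 0 hgpos]
      rw [List.getD_eq_getElem g _ h1, List.getD_eq_getElem t _ (hilt i h1),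
        List.getD_eq_getElem g _ hgpos, List.getD_eq_getElem t _ (hilt 0 hgpos)] at heq
      have e1 := congrArg Prod.fst heq
      have e2 := congrArg Prod.snd heq
      simp only at e1 e2
      simp only [Prod.mk.injEq]
      omega
    simp [hg, ht, hnorm]
  · intro hB
    rw [Bool.and_eq_true, Bool.and_eq_true] at hB
    obtain ⟨⟨hg', ht'⟩, hn'⟩ := hB
    have hg : g ≠ [] := by simpa [List.isEmpty_iff] using hg'
    have ht : t ≠ [] := by simpa [List.isEmpty_iff] using ht'
    have hnorm : pvNorm g = pvNorm t := by simpa using hn'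
    have hlen : g.length = t.length := by
      rw [← pvNorm_length g, ← pvNorm_length t, hnorm]
    have hgpos : 0 < g.length := List.length_pos_iff.mpr hg
    have hilt : ∀ i, i < g.length → i < t.length := fun i hi => by omega
    rw [pvMatchA, Bool.and_eq_true]
    refine ⟨by simp [hlen], ?_⟩
    simp only [beq_iff_eq]
    apply (pv_set_len_one_iff _).mpr
    refine ⟨((g.getD 0 (0,0)).1 - (t.getD 0 (0,0)).1, (g.getD 0 (0,0)).2 - (t.getD 0 (0,0)).2),
      ?_, ?_⟩
    · cases g with
      | nil => exact absurd rfl hg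
      | cons c gs => simp [pvOffsets]
    · intro y hy
      simp only [pvOffsets] at hy
      obtain ⟨j, hj, rfl⟩ := List.mem_map.mp hy
      have hjlt : j < g.length := List.mem_range.mp hj
      have hne : (pvNorm g)[j]'(by rw [pvNorm_length]; exact hjlt) =
          (pvNorm t)[j]'(by rw [pvNorm_length]; exact hilt j hjlt) := List.getElem_of_eq hnorm _
      rw [pvNorm_getElem g j hjlt, pvNorm_getElem t j (hilt j hjlt)] at hne
      have e1 := congrArg Prod.fst hne
      have e2 := congrArg Prod.snd hne
      simp only at e1 e2
      rw [List.getD_eq_getElem g _ hjlt, List.getD_eq_getElem t _ (hilt j hjlt),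
        List.getD_eq_getElem g _ hgpos, List.getD_eq_getElem t _ (hilt 0 hgpos)]
      simp only [Prod.mk.injEq]
      omega

theorem pvFindT_nil_none (p : List (List (Int × Int))) : pvFindT p [] = none := by
  rw [pvFindT_eq_find?, List.find?_eq_none]
  intro t _; simp [pvMatchA_eq]

theorem pvFindT_erase_none (p : List (List (Int × Int))) (g t : List (Int × Int))
    (h : pvFindT p g = none) : pvFindT (p.erase t) g = none := by
  rw [pvFindT_eq_find?, List.find?_eq_none]
  rw [pvFindT_eq_find?, List.find?_eq_none] at h
  intro x hx; exact h x (List.mem_of_mem_erase hx)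

theorem pvPass1_prefix (pre rest paths : List (List (Int × Int))) (tbl : List (List Int)) (ans : Int)
    (h : ∀ x ∈ pre, pvFindT paths x = none) :
    pvPass1 (pre ++ rest) paths tbl ans =
      ((pvPass1 rest paths tbl ans).1, pre ++ (pvPass1 rest paths tbl ans).2.1,
        (pvPass1 rest paths tbl ans).2.2) := by
  induction pre with
  | nil => simp
  | cons x pre ih =>
    simp only [List.cons_append, pvPass1, h x (by simp)]
    rw [ih (fun y hy => h y (by simp [hy]))]

theorem pvDecomp (gs paths : List (List (Int × Int))) :
    (∀ g ∈ gs, pvFindT paths g = none) ∨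
      ∃ pre g t post, gs = pre ++ g :: post ∧ (∀ x ∈ pre, pvFindT paths x = none) ∧
        pvFindT paths g = some t := by
  induction gs with
  | nil => exact Or.inl (by simp)
  | cons g rest ih =>
    cases hf : pvFindT paths g with
    | some t => exact Or.inr ⟨[], g, t, rest, by simp, by simp, hf⟩
    | none =>
      rcases ih with h | ⟨pre, g', t, post, he, hp, hg⟩
      · exact Or.inl (by simpa [hf] using h)
      · exact Or.inr ⟨g :: pre, g', t, post, by simp [he], by simpa [hf] using hp, hg⟩

theorem pvScanG_none (gs paths visited : List (List (Int × Int)))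
    (h : ∀ g ∈ gs, pvFindT paths g = none) :
    (pvScanG gs visited paths).2 = none := by
  induction gs generalizing visited with
  | nil => rfl
  | cons g rest ih =>
    simp only [pvScanG]
    split
    · exact ih _ (fun x hx => h x (by simp [hx]))
    · rw [h g (by simp)]; exact ih _ (fun x hx => h x (by simp [hx]))

theorem pvScanG_found (pre post paths visited : List (List (Int × Int)))
    (g t : List (Int × Int))
    (hpre : ∀ x ∈ pre, pvFindT paths x = none) (hg : pvFindT paths g = some t)
    (hv : ∀ v ∈ visited, pvFindT paths v = none) :
    ∃ v', pvScanG (pre ++ g :: post) visited paths = (v', some (g, t)) ∧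
      ∀ v ∈ v', pvFindT paths v = none := by
  induction pre generalizing visited with
  | nil =>
    have hgv : visited.contains g = false := by
      by_contra hc
      have : g ∈ visited := List.contains_iff_mem.mp (by simpa using hc)
      rw [hv g this] at hg; exact absurd hg (by simp)
    simp only [List.nil_append, pvScanG, hgv, hg]
    exact ⟨visited, by simp, hv⟩
  | cons x0 pre ih =>
    simp only [List.cons_append, pvScanG]
    by_cases hx : visited.contains x0
    · simp only [hx, if_true]
      exact ih visited (fun y hy => hpre y (by simp [hy])) hv
    · simp only [hx, hpre x0 (by simp)]
      exact ih (visited ++ [x0]) (fun y hy => hpre y (by simp [hy]))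
        (fun v hvv => by
          rcases List.mem_append.mp hvv with h' | h'
          · exact hv v h'
          · simp at h'; rw [h']; exact hpre x0 (by simp))

theorem pvCnt_eq_pass1_aux : ∀ (n : Nat) (gs : List (List (Int × Int))), gs.length ≤ n →
    ∀ (fuel : Nat), gs.length < fuel →
    ∀ (paths : List (List (Int × Int))) (tbl : List (List Int)) (ans : Int)
      (visited : List (List (Int × Int))),
      (∀ v ∈ visited, pvFindT paths v = none) →
      pvCnt fuel gs paths tbl ans visited = pvPass1 gs paths tbl ans := by
  intro n
  induction n with
  | zero =>
    intro gs hgs fuel hfuel paths tbl ans visited hv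
    have : gs = [] := List.eq_nil_of_length_eq_zero (Nat.le_zero.mp hgs)
    subst this
    cases fuel with
    | zero => omega
    | succ f => rfl
  | succ n ih =>
    intro gs hgs fuel hfuel paths tbl ans visited hv
    cases fuel with
    | zero => omega
    | succ f =>
      rcases pvDecomp gs paths with hnone | ⟨pre, g, t, post, he, hpre, hg⟩
      · -- no hole matches: both return the state unchanged
        have h2 := pvScanG_none gs paths visited hnone
        obtain ⟨v0, hsc⟩ : ∃ v0, pvScanG gs visited paths = (v0, none) := by
          cases hsc : pvScanG gs visited paths with
          | mk a b => simp [hsc] at h2; exact ⟨a, by simp [h2]⟩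
        simp only [pvCnt, hsc]
        have := pvPass1_prefix gs [] paths tbl ans hnone
        simpa [pvPass1] using this.symm
      · subst he
        obtain ⟨v', hscan, hv'⟩ := pvScanG_found pre post paths visited g t hpre hg hv
        have hgpre : g ∉ pre := by
          intro hmem
          rw [hpre g hmem] at hg; exact absurd hg (by simp)
        have herase : (pre ++ g :: post).erase g = pre ++ post := by
          rw [List.erase_append_right _ hgpre, List.erase_cons_head]
        simp only [pvCnt, hscan, herase]
        have hlen : (pre ++ post).length ≤ n := by
          simp at hgs ⊢; omega
        have hfl : (pre ++ post).length < f := by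
          simp at hfuel ⊢; omega
        rw [ih (pre ++ post) hlen f hfl (paths.erase t) (pvZero t tbl)
          (ans + (g.length : Int)) v' (fun v hvm => pvFindT_erase_none _ _ _ (hv' v hvm))]
        have hpre' : ∀ x ∈ pre, pvFindT (paths.erase t) x = none :=
          fun x hx => pvFindT_erase_none _ _ _ (hpre x hx)
        rw [pvPass1_prefix pre post (paths.erase t) (pvZero t tbl) (ans + (g.length : Int)) hpre',
          pvPass1_prefix pre (g :: post) paths tbl ans hpre]
        simp only [pvPass1, hg]

theorem pvCnt_eq_pass1 (gs paths : List (List (Int × Int))) (tbl : List (List Int)) (ans : Int) :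
    pvCnt (gs.length + 1) gs paths tbl ans [] = pvPass1 gs paths tbl ans :=
  pvCnt_eq_pass1_aux gs.length gs le_rfl (gs.length + 1) (by omega) paths tbl ans [] (by simp)

-- B side: the dict d indexes, per shape, exactly the remaining pieces of that shape
def PvInv (d : PySem.Dict (List (Int × Int)) (List Int))
    (p pieces : List (List (Int × Int))) : Prop :=
  ∀ key, (d.getD key []).map (fun k => PySem.List.pyGetD pieces k []) =
    p.filter (fun t => !t.isEmpty && (key == pvNorm t))

theorem pv_enum_filter_map_getD (q : List (Int × Int) → Bool) (xs : List (List (Int × Int))) :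
    ((PySem.List.enumerate xs).filter (fun kp => q kp.2)).map
      (fun kp => PySem.List.pyGetD xs kp.1 []) = xs.filter q := by
  induction xs using List.reverseRecOn with
  | nil => rfl
  | append_singleton l a ih =>
    rw [PySem.List.enumerate_append, List.filter_append, List.map_append, List.filter_append]
    congr 1
    · rw [← ih]
      apply List.map_congr_left
      intro kp hkp
      obtain ⟨k, hk, hkp2⟩ := (PySem.List.mem_enumerate_iff _ _ _).mp (List.mem_of_mem_filter hkp)
      subst hkp2
      show PySem.List.pyGetD (l ++ [a]) ((0 : Int) + (k : Int)) [] = PySem.List.pyGetD l ((0 : Int) + (k : Int)) []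
      rw [zero_add]
      rw [PySem.List.pyGetD_natCast, PySem.List.pyGetD_natCast]
      exact List.getD_append l [a] [] k hk
    · rw [PySem.List.enumerate_cons, PySem.List.enumerate_nil]
      by_cases hq : q a
      · simp only [List.filter_cons, List.filter_nil, hq, if_pos, List.map]
        rw [show ((0 : Int) + (l.length : Int)) = (l.length : Int) by ring]
        rw [PySem.List.pyGetD_natCast]
        have hlt : l.length < (l ++ [a]).length := by simp
        rw [List.getD_eq_getElem (l ++ [a]) [] hlt]
        simp
      · simp [hq]

theorem pvBuildIndex_getD (pieces : List (List (Int × Int))) (key : List (Int × Int)) :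
    ((pvBuildIndex pieces).getD key []).map (fun k => PySem.List.pyGetD pieces k []) =
      pieces.filter (fun t => !t.isEmpty && (key == pvNorm t)) := by
  have hfold : pvBuildIndex pieces =
      (((PySem.List.enumerate pieces).filter (fun kp => !kp.2.isEmpty)).map
        (fun kp => ((pvNorm kp.2, kp.1) : List (Int × Int) × Int))).foldl
        (fun d p => d.modify p.1 [] (· ++ [p.2])) PySem.Dict.empty := by
    rw [List.foldl_map, List.foldl_filter, pvBuildIndex]
    congr 1
    funext d kp
    by_cases h : kp.2.isEmpty <;> simp [h]
  rw [hfold, PySem.Dict.getD_foldl_modify_append, PySem.Dict.getD_empty, List.nil_append]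
  rw [List.filter_map, List.map_map, List.map_map, List.filter_filter]
  dsimp only [Function.comp_def]
  rw [pv_enum_filter_map_getD (fun t => (pvNorm t == key) && !t.isEmpty) pieces]
  apply List.filter_congr
  intro t _
  rw [Bool.and_comm, Bool.beq_comm]

theorem pv_filter_erase_head {α : Type} [BEq α] [LawfulBEq α] (p : List α) (q : α → Bool)
    (t : α) (rest : List α) (h : p.filter q = t :: rest) : (p.erase t).filter q = rest := by
  induction p generalizing rest with
  | nil => simp at h
  | cons x xs ih =>
    rw [List.filter_cons] at h
    by_cases hq : q x = true
    · rw [if_pos hq] at h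
      obtain ⟨rfl, hrest⟩ := List.cons.inj h
      simp [List.erase_cons_head, hrest]
    · rw [if_neg hq] at h
      have hqt : q t = true := by
        have : t ∈ xs.filter q := by rw [h]; simp
        exact (List.mem_filter.mp this).2
      have hxt : x ≠ t := fun he => hq (he ▸ hqt)
      rw [List.erase_cons_tail (by simp [hxt]), List.filter_cons, if_neg hq]
      exact ih _ h

theorem pv_filter_erase_neg {α : Type} [BEq α] [LawfulBEq α] (p : List α) (q : α → Bool)
    (t : α) (h : q t = false) : (p.erase t).filter q = p.filter q := by
  induction p with
  | nil => simp
  | cons x xs ih =>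
    by_cases hx : x = t
    · subst hx
      rw [List.erase_cons_head, List.filter_cons, if_neg (by simp [h])]
    · rw [List.erase_cons_tail (by simp [hx]), List.filter_cons, List.filter_cons, ih]

theorem pvBPass_eq_pass1 (holes : List (List (Int × Int))) :
    ∀ (p pieces : List (List (Int × Int))) (d : PySem.Dict (List (Int × Int)) (List Int))
      (tbl : List (List Int)) (ans : Int) (rest : List (List (Int × Int))),
      PvInv d p pieces →
      pvBPass holes pieces d tbl ans rest =
        ((pvPass1 holes p tbl ans).1, rest ++ (pvPass1 holes p tbl ans).2.1,
          (pvPass1 holes p tbl ans).2.2) := by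
  induction holes with
  | nil => intro p pieces d tbl ans rest hinv; simp [pvBPass, pvPass1]
  | cons g hs ih =>
    intro p pieces d tbl ans rest hinv
    by_cases hge : g.isEmpty
    · have hgnil : g = [] := by simpa [List.isEmpty_iff] using hge
      simp only [pvBPass, if_pos hge]
      rw [ih p pieces d tbl ans (rest ++ [g]) hinv]
      subst hgnil
      simp [pvPass1, pvFindT_nil_none]
    · have hfind : pvFindT p g = (p.filter (fun t => !t.isEmpty && (pvNorm g == pvNorm t))).head? := by
        rw [pvFindT_eq_find?, ← List.head?_filter]
        congr 1
        apply List.filter_congr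
        intro t _
        rw [pvMatchA_eq]
        simp [hge]
      have hkey := hinv (pvNorm g)
      cases hd : (d.getD (pvNorm g) []) with
      | nil =>
        simp only [pvBPass, if_neg hge, hd]
        rw [hd] at hkey
        have hfn : pvFindT p g = none := by
          rw [hfind, ← hkey]; simp
        rw [ih p pieces d tbl ans (rest ++ [g]) hinv]
        simp only [pvPass1, hfn]
        simp
      | cons k ks =>
        simp only [pvBPass, if_neg hge, hd]
        rw [hd] at hkey
        have hfilter : p.filter (fun t => !t.isEmpty && (pvNorm g == pvNorm t)) =
            PySem.List.pyGetD pieces k [] :: ks.map (fun k => PySem.List.pyGetD pieces k []) := by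
          rw [← hkey]; simp
        have hfs : pvFindT p g = some (PySem.List.pyGetD pieces k []) := by
          rw [hfind, hfilter]; rfl
        have hinv' : PvInv (d.insert (pvNorm g) ks) (p.erase (PySem.List.pyGetD pieces k [])) pieces := by
          intro key
          by_cases hk : key = pvNorm g
          · subst hk
            rw [PySem.Dict.getD_insert_self]
            exact (pv_filter_erase_head p _ _ _ hfilter).symm
          · rw [PySem.Dict.getD_insert_of_ne _ _ _ hk, hinv key]
            apply (pv_filter_erase_neg p _ _ _).symm
            have ht0f : PySem.List.pyGetD pieces k [] ∈
                p.filter (fun t => !t.isEmpty && (pvNorm g == pvNorm t)) := by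
              rw [hfilter]; simp
            have h2 := (List.mem_filter.mp ht0f).2
            have hnt0 : pvNorm (PySem.List.pyGetD pieces k []) = pvNorm g := by
              simp at h2; exact h2.2.symm
            simp [hnt0, hk]
        rw [ih (p.erase (PySem.List.pyGetD pieces k [])) pieces (d.insert (pvNorm g) ks)
          (pvZero (PySem.List.pyGetD pieces k []) tbl) (ans + (g.length : Int)) rest hinv']
        simp only [pvPass1, hfs]

theorem pvPass1_ans (gs : List (List (Int × Int))) :
    ∀ (p : List (List (Int × Int))) (tbl : List (List Int)) (ans : Int),
    pvPass1 gs p tbl ans = ((pvPass1 gs p tbl 0).1 + ans, (pvPass1 gs p tbl 0).2) := by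
  induction gs with
  | nil => intro p tbl ans; simp [pvPass1]
  | cons g rest ih =>
    intro p tbl ans
    cases hf : pvFindT p g with
    | some t =>
      simp only [pvPass1, hf]
      rw [ih (p.erase t) (pvZero t tbl) (ans + (g.length : Int)),
        ih (p.erase t) (pvZero t tbl) ((0 : Int) + (g.length : Int))]
      simp only [Prod.mk.injEq, and_true]
      ring
    | none =>
      simp only [pvPass1, hf]
      rw [ih p tbl ans]

-- one abstract stage: match every remaining hole against the current board's pieces,
-- then rotate
def pvStepS (st : List (List (Int × Int)) × List (List Int) × Int) :
    List (List (Int × Int)) × List (List Int) × Int :=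
  let r := pvPass1 st.1 ((pvExtract st.2.1 0).2) st.2.1 0
  (r.2.1, pvRot r.2.2, st.2.2 + r.1)

theorem solution_eq_steps (gb tb : List (List Int)) :
    solution gb tb = (pvStepS (pvStepS (pvStepS (pvStepS ((pvExtract gb 1).2, tb, 0))))).2.2 := by
  simp only [solution, pvCnt_eq_pass1, pvStepS]

theorem pvBStep_eq_stepS (st : List (List (Int × Int)) × List (List Int) × Int) :
    pvBStep st = pvStepS st := by
  have hinv : PvInv (pvBuildIndex ((pvExtract st.2.1 0).2)) ((pvExtract st.2.1 0).2)
      ((pvExtract st.2.1 0).2) := fun key => pvBuildIndex_getD _ key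
  simp only [pvBStep]
  rw [pvBPass_eq_pass1 st.1 ((pvExtract st.2.1 0).2) ((pvExtract st.2.1 0).2) _ st.2.1 st.2.2 [] hinv]
  rw [pvPass1_ans st.1 _ st.2.1 st.2.2]
  simp [pvStepS, add_comm]

theorem solution_alt_eq_steps (gb tb : List (List Int)) :
    solution_alt gb tb = (pvStepS (pvStepS (pvStepS (pvStepS ((pvExtract gb 1).2, tb, 0))))).2.2 := by
  have h4 : PySem.List.pyRange 0 4 1 = [0, 1, 2, 3] := by decide
  simp only [solution_alt, h4, List.foldl_cons, List.foldl_nil, pvBStep_eq_stepS]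

-- ===== VERDICT (by name: the statement is the Claim_ definition above) =====
theorem solution_spec : Claim_equal_solution := by
  intro gb tb _ _
  unfold Spec_solution
  rw [solution_eq_steps, solution_alt_eq_steps]
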